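-- pv_equiv track=rewrite | github.com/swinslow/ll-explorer-py | loadxml.py | _getPrecedingLineCount
-- ===== SOURCE A (Python) =====
-- def _getPrecedingLineCount(s):
--     # return 0 if only whitespace present
--     if s.strip() == "":
--         return 0
--
--     count = 0
--     sp = s.splitlines()
--     for l in sp:
--         if l.strip() != "":
--             return count
--         count += 1
--     return count
-- ===== SOURCE B (Python) =====
-- def _getPrecedingLineCount(s):
--     # return 0 if only whitespace present
--     if s.strip() == "":
--         return 0
--     # locate the first non-whitespace character (exists by the guard above),
--     # then count the completed lines in the prefix up to and including it
--     pos = next(i for i, c in enumerate(s) if not c.isspace())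
--     return len(s[:pos + 1].splitlines()) - 1
-- ===== Notes on version B (the rewrite author's own statement) =====
-- stated objective: simpler
-- what changed: Instead of A's per-line scan over s.splitlines() with a counter and early return, B locates the first non-whitespace character and returns the number of completed lines in the prefix up to and including it (len(s[:pos+1].splitlines()) - 1).
import Mathlib
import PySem

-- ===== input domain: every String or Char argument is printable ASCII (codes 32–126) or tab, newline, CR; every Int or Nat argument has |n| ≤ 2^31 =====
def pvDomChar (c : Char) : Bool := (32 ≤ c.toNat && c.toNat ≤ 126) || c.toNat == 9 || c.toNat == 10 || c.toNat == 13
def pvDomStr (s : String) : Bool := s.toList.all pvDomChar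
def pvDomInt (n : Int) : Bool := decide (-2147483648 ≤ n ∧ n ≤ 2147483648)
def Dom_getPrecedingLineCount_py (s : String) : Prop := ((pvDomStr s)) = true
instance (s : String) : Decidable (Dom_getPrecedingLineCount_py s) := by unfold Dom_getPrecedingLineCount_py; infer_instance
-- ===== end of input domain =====

-- B locates the first non-whitespace character and counts the line boundaries in the
-- prefix up to it, instead of A's per-line scan with a counter (objective: simpler).

-- ===== PORT A =====
-- the for-loop over s.splitlines() with early return
def pvALoop : List String → Int → Int
  | [], count => count
  | l :: rest, count =>
      if PySem.Str.strip l ≠ "" then count else pvALoop rest (count + 1)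

def getPrecedingLineCount_py (s : String) : Int :=
  if PySem.Str.strip s = "" then 0
  else pvALoop (PySem.Str.splitlines s) 0

-- ===== PORT B =====
-- next(i for i, c in enumerate(s) if not c.isspace()); the 0 at [] is unreachable
-- under B's guard (the generator is exhausted only on all-whitespace input)
def pvFirstNonSpace : List Char → Nat
  | [] => 0
  | c :: rest => if PySem.Chars.isspace c then pvFirstNonSpace rest + 1 else 0

def getPrecedingLineCount_py_alt (s : String) : Int :=
  if PySem.Str.strip s = "" then 0
  else
    let pos := pvFirstNonSpace s.toList
    ((PySem.Str.splitlines (PySem.Str.slice s none (some ((pos : Int) + 1)))).length : Int) - 1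

-- ===== PRECONDITION & SPEC =====
def Spec_getPrecedingLineCount_py (s : String) (out : Int) : Prop := out = getPrecedingLineCount_py_alt s
instance (s : String) (out : Int) : Decidable (Spec_getPrecedingLineCount_py s out) := by unfold Spec_getPrecedingLineCount_py; infer_instance

-- ===== CLAIM (what is proved, stated in full; the proofs are below) =====
def Claim_equal_getPrecedingLineCount_py : Prop := ∀ (s : String), Dom_getPrecedingLineCount_py s → Spec_getPrecedingLineCount_py s (getPrecedingLineCount_py s)

-- ===== LEMMAS AND PROOFS =====

-- the boundary predicate splitlines uses, named (definitionally equal to the inline one)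
def pvIsB (c : Char) : Bool :=
  have n := c.toNat
  decide (n = 10) || decide (n = 13) || decide (n = 11) || decide (n = 12) ||
    decide (n = 28) || decide (n = 29) || decide (n = 30) || decide (n = 133) ||
    decide (n = 8232) || decide (n = 8233)

theorem pv_splitlines_eq_go (s : List Char) :
    PySem.Chars.splitlines s = PySem.Chars.splitlines.go pvIsB s [] [] := rfl

theorem pvIsB_isspace (c : Char) (h : pvIsB c = true) : PySem.Chars.isspace c = true := by
  simp [pvIsB] at h
  simp [PySem.Chars.isspace]
  omega

theorem pv_not_cr (c : Char) (hc : ¬ PySem.Chars.isspace c = true) : c ≠ '\r' := by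
  rintro rfl; exact hc (by decide)

theorem pv_not_lf (c : Char) (hc : ¬ PySem.Chars.isspace c = true) : c ≠ '\n' := by
  rintro rfl; exact hc (by decide)

-- number of completed line boundaries in a list (Python's line-break rule)
def pvNb : List Char → Nat
  | [] => 0
  | '\r' :: '\n' :: t => pvNb t + 1
  | c :: t => pvNb t + (if pvIsB c then 1 else 0)

theorem pvNb_cons (c : Char) (t : List Char) (h : ∀ r, c :: t ≠ '\r' :: '\n' :: r) :
    pvNb (c :: t) = pvNb t + (if pvIsB c then 1 else 0) := by
  rw [pvNb.eq_def]
  split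
  · simp_all
  · rename_i heq; exact absurd heq (h _)
  · rename_i heq; cases heq; rfl

theorem pv_go_nil (isB : Char → Bool) (cur : List Char) (acc : List (List Char)) :
    PySem.Chars.splitlines.go isB [] cur acc =
      if cur.isEmpty then acc.reverse else (cur.reverse :: acc).reverse := rfl

theorem pv_go_rn (isB : Char → Bool) (rest cur : List Char) (acc : List (List Char)) :
    PySem.Chars.splitlines.go isB ('\r' :: '\n' :: rest) cur acc =
      PySem.Chars.splitlines.go isB rest [] (cur.reverse :: acc) := rfl

theorem pv_go_cons (isB : Char → Bool) (c : Char) (rest cur : List Char) (acc : List (List Char))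
    (h : ∀ r, c :: rest ≠ '\r' :: '\n' :: r) :
    PySem.Chars.splitlines.go isB (c :: rest) cur acc =
      (if isB c then PySem.Chars.splitlines.go isB rest [] (cur.reverse :: acc)
       else PySem.Chars.splitlines.go isB rest (c :: cur) acc) := by
  rw [PySem.Chars.splitlines.go.eq_def]
  split
  · simp_all
  · rename_i heq; exact absurd heq (h _)
  · rename_i heq; cases heq; rfl

-- the accumulator of splitlines.go just prepends
theorem pv_go_acc (isB : Char → Bool) (s cur : List Char) (acc : List (List Char)) :
    PySem.Chars.splitlines.go isB s cur acc =
      acc.reverse ++ PySem.Chars.splitlines.go isB s cur [] := by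
  refine PySem.Chars.splitlines.go.induct isB
    (motive := fun s cur _ => ∀ acc',
      PySem.Chars.splitlines.go isB s cur acc' =
        acc'.reverse ++ PySem.Chars.splitlines.go isB s cur [])
    ?_ ?_ ?_ ?_ ?_ s cur [] acc
  · intro cur acc h acc'
    simp [pv_go_nil, h]
  · intro cur acc h acc'
    simp [pv_go_nil, h]
  · intro rest cur acc ih acc'
    rw [pv_go_rn, pv_go_rn, ih (cur.reverse :: acc'), ih [cur.reverse]]
    simp
  · intro c rest cur acc hne hb ih acc'
    have h : ∀ r, c :: rest ≠ '\r' :: '\n' :: r := by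
      intro r heq
      obtain ⟨rfl, rfl⟩ := List.cons.injEq .. ▸ heq
      · exact hne r rfl rfl
    rw [pv_go_cons isB c rest _ _ h, pv_go_cons isB c rest _ _ h, if_pos hb, if_pos hb,
      ih (cur.reverse :: acc'), ih [cur.reverse]]
    simp
  · intro c rest cur acc hne hb ih acc'
    have h : ∀ r, c :: rest ≠ '\r' :: '\n' :: r := by
      intro r heq
      obtain ⟨rfl, rfl⟩ := List.cons.injEq .. ▸ heq
      · exact hne r rfl rfl
    rw [pv_go_cons isB c rest _ _ h, pv_go_cons isB c rest _ _ h, if_neg hb, if_neg hb, ih acc']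

-- A-side loop restated on char lists
def pvCharALoop : List (List Char) → Int → Int
  | [], count => count
  | l :: ls, count =>
      if PySem.Chars.strip l ≠ [] then count else pvCharALoop ls (count + 1)

theorem pv_str_eq_empty_iff (t : String) : t = "" ↔ t.toList = [] :=
  Iff.symm String.toList_eq_nil_iff

theorem pvALoop_eq_char (ls : List String) (count : Int) :
    pvALoop ls count = pvCharALoop (ls.map String.toList) count := by
  induction ls generalizing count with
  | nil => rfl
  | cons l ls ih =>
      simp only [pvALoop, pvCharALoop, List.map_cons]
      have : (PySem.Str.strip l = "") ↔ (PySem.Chars.strip l.toList = []) := by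
        rw [pv_str_eq_empty_iff, PySem.Str.toList_strip]
      by_cases h : PySem.Chars.strip l.toList = []
      · rw [if_neg (by simpa [this] using h), if_neg (by simpa using h)]; exact ih _
      · rw [if_pos (by simpa [this] using h), if_pos (by simpa using h)]

theorem pv_strip_eq_nil_iff (l : List Char) :
    PySem.Chars.strip l = [] ↔ ∀ x ∈ l, PySem.Chars.isspace x = true := by
  constructor
  · intro h
    by_cases hl : l.dropWhile PySem.Chars.isspace = []
    · exact List.dropWhile_eq_nil_iff.mp hl
    · exfalso
      have hhd := List.head_dropWhile_not PySem.Chars.isspace hl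
      have : PySem.Chars.lstrip l ≠ [] := hl
      -- rstrip of a nonempty list whose head is non-space is nonempty
      have h2 : PySem.Chars.rstrip (PySem.Chars.lstrip l) = [] := h
      have : ∀ x ∈ PySem.Chars.lstrip l, PySem.Chars.isspace x = true := by
        intro x hx
        have := List.dropWhile_eq_nil_iff.mp
          (by simpa [PySem.Chars.rstrip, List.reverse_eq_nil_iff] using h2)
        exact this x (by simpa using hx)
      exact absurd (this _ (List.head_mem hl)) (by simp [hhd])
  · intro h
    have h1 : PySem.Chars.lstrip l = [] :=
      List.dropWhile_eq_nil_iff.mpr h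
    show PySem.Chars.rstrip (PySem.Chars.lstrip l) = []
    rw [h1]
    rfl

-- a line that already holds a non-whitespace character makes A return at once
theorem pv_first_content (s cur : List Char) (count : Int)
    (h : ∃ x ∈ cur, ¬ PySem.Chars.isspace x = true) :
    pvCharALoop (PySem.Chars.splitlines.go pvIsB s cur []) count = count := by
  have hstrip : ∀ (m : List Char), (∃ x ∈ m, ¬ PySem.Chars.isspace x = true) →
      PySem.Chars.strip m.reverse ≠ [] := by
    intro m ⟨x, hx, hxs⟩ hc
    exact hxs (pv_strip_eq_nil_iff m.reverse |>.mp hc x (by simpa using hx))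
  refine PySem.Chars.splitlines.go.induct pvIsB
    (motive := fun s cur _ =>
      (∃ x ∈ cur, ¬ PySem.Chars.isspace x = true) → ∀ count,
        pvCharALoop (PySem.Chars.splitlines.go pvIsB s cur []) count = count)
    ?_ ?_ ?_ ?_ ?_ s cur [] h count
  · intro cur acc hemp hw count
    obtain ⟨x, hx, _⟩ := hw
    simp [List.isEmpty_iff.mp hemp] at hx
  · intro cur acc hemp hw count
    rw [pv_go_nil, if_neg hemp]
    simp [pvCharALoop, hstrip cur hw]
  · intro rest cur acc ih hw count
    rw [pv_go_rn, pv_go_acc]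
    simp [pvCharALoop, hstrip cur hw]
  · intro c rest cur acc hne hb ih hw count
    have hcons : ∀ r, c :: rest ≠ '\r' :: '\n' :: r := by
      intro r heq
      obtain ⟨rfl, rfl⟩ := List.cons.injEq .. ▸ heq
      · exact hne r rfl rfl
    rw [pv_go_cons pvIsB c rest _ _ hcons, if_pos hb, pv_go_acc]
    simp [pvCharALoop, hstrip cur hw]
  · intro c rest cur acc hne hb ih hw count
    have hcons : ∀ r, c :: rest ≠ '\r' :: '\n' :: r := by
      intro r heq
      obtain ⟨rfl, rfl⟩ := List.cons.injEq .. ▸ heq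
      · exact hne r rfl rfl
    rw [pv_go_cons pvIsB c rest _ _ hcons, if_neg hb]
    obtain ⟨x, hx, hxs⟩ := hw
    exact ih ⟨x, by simp [hx], hxs⟩ count

-- A's loop over the whitespace prefix counts exactly the line boundaries in it
theorem pv_aloop_ws (c : Char) (rest : List Char) (hc : ¬ PySem.Chars.isspace c = true)
    (w : List Char) :
    ∀ (cur : List Char) (count : Int),
      (∀ x ∈ w, PySem.Chars.isspace x = true) → (∀ x ∈ cur, PySem.Chars.isspace x = true) →
      pvCharALoop (PySem.Chars.splitlines.go pvIsB (w ++ c :: rest) cur []) count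
        = count + (pvNb w : Int) := by
  induction w using pvNb.induct with
  | case1 =>
      intro cur count _ hcur
      have hcons : ∀ r, c :: rest ≠ '\r' :: '\n' :: r := by
        intro r heq
        exact pv_not_cr c hc (by injection heq)
      rw [List.nil_append, pv_go_cons pvIsB c rest _ _ hcons,
        if_neg (fun hb => hc (pvIsB_isspace c hb))]
      rw [pv_first_content rest (c :: cur) count ⟨c, by simp, hc⟩]
      simp [pvNb]
  | case2 t ih =>
      intro cur count hw hcur
      rw [List.cons_append, List.cons_append, pv_go_rn, pv_go_acc]
      have hstrip : PySem.Chars.strip cur.reverse = [] :=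
        pv_strip_eq_nil_iff cur.reverse |>.mpr (fun x hx => hcur x (by simpa using hx))
      simp only [List.reverse_cons, List.reverse_nil, List.nil_append, List.singleton_append,
        pvCharALoop, ne_eq, hstrip, not_true_eq_false, if_false]
      rw [ih [] (count + 1) (fun x hx => hw x (by simp [hx])) (by simp)]
      simp [pvNb]; ring
  | case3 x t hne ih =>
      intro cur count hw hcur
      have hx : PySem.Chars.isspace x = true := hw x (by simp)
      have hcons : ∀ r, x :: (t ++ c :: rest) ≠ '\r' :: '\n' :: r := by
        intro r heq
        have hx1 : x = '\r' := by injection heq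
        have ht : t ++ c :: rest = '\n' :: r := by injection heq
        cases t with
        | nil => exact pv_not_lf c hc (by injection ht)
        | cons y t' => exact hne _ hx1 (by injection ht with h1 h2; rw [h1])
      have hnb : pvNb (x :: t) = pvNb t + (if pvIsB x then 1 else 0) := by
        apply pvNb_cons
        intro r heq
        have hx1 : x = '\r' := by injection heq
        exact hne r hx1 (by injection heq)
      rw [List.cons_append, pv_go_cons pvIsB x (t ++ c :: rest) _ _ hcons]
      by_cases hb : pvIsB x = true
      · rw [if_pos hb, pv_go_acc]
        have hstrip : PySem.Chars.strip cur.reverse = [] :=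
          pv_strip_eq_nil_iff cur.reverse |>.mpr (fun y hy => hcur y (by simpa using hy))
        simp only [List.reverse_cons, List.reverse_nil, List.nil_append, List.singleton_append,
          pvCharALoop, ne_eq, hstrip, not_true_eq_false, if_false]
        rw [ih [] (count + 1) (fun y hy => hw y (by simp [hy])) (by simp)]
        simp [hnb, hb]; ring
      · rw [if_neg hb]
        rw [ih (x :: cur) count (fun y hy => hw y (by simp [hy]))
          (by intro y hy; rcases List.mem_cons.mp hy with rfl | hy; exact hx; exact hcur y hy)]
        simp [hnb, hb]

-- B's prefix-with-one-content-character splits into exactly pvNb w + 1 lines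
theorem pv_blen_ws (c : Char) (hc : ¬ PySem.Chars.isspace c = true) (w : List Char) :
    ∀ (cur : List Char),
      (∀ x ∈ w, PySem.Chars.isspace x = true) →
      (PySem.Chars.splitlines.go pvIsB (w ++ [c]) cur []).length = pvNb w + 1 := by
  induction w using pvNb.induct with
  | case1 =>
      intro cur _
      have hcons : ∀ r, c :: ([] : List Char) ≠ '\r' :: '\n' :: r := by
        intro r heq
        exact pv_not_cr c hc (by injection heq)
      rw [List.nil_append, pv_go_cons pvIsB c [] _ _ hcons,
        if_neg (fun hb => hc (pvIsB_isspace c hb)), pv_go_nil]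
      simp [pvNb]
  | case2 t ih =>
      intro cur hw
      rw [List.cons_append, List.cons_append, pv_go_rn, pv_go_acc]
      rw [List.length_append]
      rw [ih [] (fun x hx => hw x (by simp [hx]))]
      simp [pvNb]
      omega
  | case3 x t hne ih =>
      intro cur hw
      have hcons : ∀ r, x :: (t ++ [c]) ≠ '\r' :: '\n' :: r := by
        intro r heq
        have hx1 : x = '\r' := by injection heq
        have ht : t ++ [c] = '\n' :: r := by injection heq
        cases t with
        | nil => exact pv_not_lf c hc (by injection ht)
        | cons y t' => exact hne _ hx1 (by injection ht with h1 h2; rw [h1])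
      have hnb : pvNb (x :: t) = pvNb t + (if pvIsB x then 1 else 0) := by
        apply pvNb_cons
        intro r heq
        have hx1 : x = '\r' := by injection heq
        exact hne r hx1 (by injection heq)
      rw [List.cons_append, pv_go_cons pvIsB x (t ++ [c]) _ _ hcons]
      by_cases hb : pvIsB x = true
      · rw [if_pos hb, pv_go_acc, List.length_append]
        rw [ih [] (fun y hy => hw y (by simp [hy]))]
        simp [hnb, hb]; ring
      · rw [if_neg hb, ih (x :: cur) (fun y hy => hw y (by simp [hy]))]
        simp [hnb, hb]

theorem pv_fns_ws (w : List Char) (c : Char) (rest : List Char)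
    (hw : ∀ x ∈ w, PySem.Chars.isspace x = true) (hc : ¬ PySem.Chars.isspace c = true) :
    pvFirstNonSpace (w ++ c :: rest) = w.length := by
  induction w with
  | nil => simp [pvFirstNonSpace, hc]
  | cons x t ih =>
      have hx : PySem.Chars.isspace x = true := hw x (by simp)
      simp only [List.cons_append, pvFirstNonSpace, hx, if_pos]
      rw [ih (fun y hy => hw y (by simp [hy]))]
      simp

-- ===== VERDICT (by name: the statement is the Claim_ definition above) =====
theorem getPrecedingLineCount_py_spec : Claim_equal_getPrecedingLineCount_py := by
  intro s _
  unfold Spec_getPrecedingLineCount_py getPrecedingLineCount_py getPrecedingLineCount_py_alt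
  by_cases hs : PySem.Str.strip s = ""
  · rw [if_pos hs, if_pos hs]
  · rw [if_neg hs, if_neg hs]
    have hall : ¬ ∀ x ∈ s.toList, PySem.Chars.isspace x = true := by
      intro h
      exact hs ((pv_str_eq_empty_iff _).mpr (by rw [PySem.Str.toList_strip]; exact (pv_strip_eq_nil_iff _).mpr h))
    set cs := s.toList with hcs
    have hdrop : cs.dropWhile PySem.Chars.isspace ≠ [] := by
      intro h
      exact hall (List.dropWhile_eq_nil_iff.mp h)
    set w := cs.takeWhile PySem.Chars.isspace with hwdef
    obtain ⟨c, r, hcr⟩ := List.exists_cons_of_ne_nil hdrop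
    have hdecomp : cs = w ++ c :: r := by
      rw [hwdef, ← hcr, List.takeWhile_append_dropWhile]
    have hwws : ∀ x ∈ w, PySem.Chars.isspace x = true := fun x hx => List.mem_takeWhile_imp hx
    have hcns : ¬ PySem.Chars.isspace c = true := by
      have h1 := List.head_dropWhile_not PySem.Chars.isspace hdrop
      have h2 : (List.dropWhile PySem.Chars.isspace cs).head hdrop = c := by
        simp [hcr]
      rw [h2] at h1
      simp [h1]
    -- A's side
    have hA : pvALoop (PySem.Str.splitlines s) 0 = (pvNb w : Int) := by
      rw [pvALoop_eq_char, PySem.Str.splitlines_map_toList, ← hcs, pv_splitlines_eq_go,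
        hdecomp, pv_aloop_ws c r hcns w [] 0 hwws (by simp)]
      simp
    -- B's side
    have hpos : pvFirstNonSpace cs = w.length := by
      rw [hdecomp]; exact pv_fns_ws w c r hwws hcns
    have hslice : (PySem.Str.slice s none (some ((pvFirstNonSpace s.toList : Int) + 1))).toList
        = w ++ [c] := by
      rw [PySem.Str.toList_slice, PySem.Chars.slice_eq_listSlice, ← hcs, hpos]
      have : ((w.length : Int) + 1) = ((w.length + 1 : Nat) : Int) := by push_cast; ring
      rw [this, PySem.List.slice_to_natCast, hdecomp, List.take_append]
      simp
    have hB : ((PySem.Str.splitlines (PySem.Str.slice s none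
        (some ((pvFirstNonSpace s.toList : Int) + 1)))).length : Int) - 1 = (pvNb w : Int) := by
      have hlen : (PySem.Str.splitlines (PySem.Str.slice s none
          (some ((pvFirstNonSpace s.toList : Int) + 1)))).length
          = (PySem.Chars.splitlines (w ++ [c])).length := by
        rw [← List.length_map String.toList, PySem.Str.splitlines_map_toList, hslice]
      rw [hlen, pv_splitlines_eq_go, pv_blen_ws c hcns w [] hwws]
      push_cast; ring
    rw [hA, ← hB]
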